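-- pv_equiv track=rewrite | github.com/berginj/PitchTracker | ui/device_utils.py | sort_cameras_prefer_arducam
-- ===== SOURCE A (Python) =====
-- def is_arducam_device(name: str) -> bool:
--     """Check if a device name indicates an ArduCam device.
--
--     Args:
--         name: Device friendly name
--
--     Returns:
--         True if device is an ArduCam
--     """
--     if not name:
--         return False
--     name_lower = name.lower()
--     return "arducam" in name_lower or "ardu cam" in name_lower
--
-- def sort_cameras_prefer_arducam(devices: list[dict[str, str]]) -> list[dict[str, str]]:
--     """Sort camera list to put ArduCam devices first.
--
--     Args:
--         devices: List of device info dicts with 'friendly_name' key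
--
--     Returns:
--         Sorted list with ArduCam devices first, then others
--     """
--     arducam_devices = []
--     other_devices = []
--
--     for device in devices:
--         name = device.get('friendly_name', '')
--         if is_arducam_device(name):
--             arducam_devices.append(device)
--         else:
--             other_devices.append(device)
--
--     return arducam_devices + other_devices
-- ===== SOURCE B (Python) =====
-- def is_arducam_device(name: str) -> bool:
--     if not name:
--         return False
--     name_lower = name.lower()
--     return "arducam" in name_lower or "ardu cam" in name_lower
--
--
-- def sort_cameras_prefer_arducam(devices: list[dict[str, str]]) -> list[dict[str, str]]:
--     return sorted(devices,
--                   key=lambda d: 0 if is_arducam_device(d.get('friendly_name', '')) else 1)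
-- ===== Notes on version B (the rewrite author's own statement) =====
-- stated objective: idiomatic
-- what changed: Replaces the manual two-bucket partition loop with a single stable sorted() call keyed on a binary 0/1 ArduCam flag; stability guarantees the identical output order.
import Mathlib
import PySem

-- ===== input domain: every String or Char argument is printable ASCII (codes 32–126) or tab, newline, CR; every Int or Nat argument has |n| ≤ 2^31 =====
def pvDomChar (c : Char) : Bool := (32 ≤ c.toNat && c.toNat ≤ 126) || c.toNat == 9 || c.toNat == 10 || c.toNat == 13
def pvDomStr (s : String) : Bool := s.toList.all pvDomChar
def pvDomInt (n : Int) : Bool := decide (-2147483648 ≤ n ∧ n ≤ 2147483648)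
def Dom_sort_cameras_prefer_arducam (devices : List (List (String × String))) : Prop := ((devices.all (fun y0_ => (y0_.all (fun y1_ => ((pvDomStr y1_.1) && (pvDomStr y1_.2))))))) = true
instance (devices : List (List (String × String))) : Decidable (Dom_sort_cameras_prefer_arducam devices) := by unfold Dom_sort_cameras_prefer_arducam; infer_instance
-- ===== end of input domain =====

-- B replaces A's manual two-bucket partition with one stable key-sort (binary 0/1 key); same output, idiomatic, not faster.


-- ===== PORT A =====
def is_arducam_device (name : String) : Bool :=
  if name = "" then false
  else
    let name_lower := PySem.Str.lower name
    PySem.Str.isIn "arducam" name_lower || PySem.Str.isIn "ardu cam" name_lower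

def sort_cameras_prefer_arducam (devices : List (List (String × String))) : List (List (String × String)) :=
  let p := devices.foldl
    (fun (acc : List (List (String × String)) × List (List (String × String))) (device : List (String × String)) =>
      let name := PySem.Dict.getD (PySem.Dict.mk device) "friendly_name" ""
      if is_arducam_device name then (acc.1 ++ [device], acc.2) else (acc.1, acc.2 ++ [device]))
    ([], [])
  p.1 ++ p.2

-- ===== PORT B =====
def sort_cameras_prefer_arducam_alt (devices : List (List (String × String))) : List (List (String × String)) :=
  PySem.List.sorted devices
    (fun (d : List (String × String)) => if is_arducam_device (PySem.Dict.getD (PySem.Dict.mk d) "friendly_name" "") then (0 : Int) else 1)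

-- ===== PRECONDITION & SPEC =====
def Spec_sort_cameras_prefer_arducam (devices : List (List (String × String))) (out : List (List (String × String))) : Prop := out = sort_cameras_prefer_arducam_alt devices
instance (devices : List (List (String × String))) (out : List (List (String × String))) : Decidable (Spec_sort_cameras_prefer_arducam devices out) := by unfold Spec_sort_cameras_prefer_arducam; infer_instance

-- ===== CLAIM (what is proved, stated in full; the proofs are below) =====
def Claim_equal_sort_cameras_prefer_arducam : Prop := ∀ (devices : List (List (String × String))), Dom_sort_cameras_prefer_arducam devices → Spec_sort_cameras_prefer_arducam devices (sort_cameras_prefer_arducam devices)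

-- ===== LEMMAS AND PROOFS =====

-- inserting a key-0 element into (all-0 list ++ all-1 list) puts it exactly between the blocks
lemma insertBy_binary_mid {α : Type} (key : α → Int) (x : α) (A O : List α)
    (hx : key x = 0) (hA : ∀ a ∈ A, key a = 0) (hO : ∀ o ∈ O, key o = 1) :
    PySem.List.insertBy (fun a b => decide (key a < key b)) x (A ++ O) = A ++ x :: O := by
  induction A with
  | nil =>
      cases O with
      | nil => simp [PySem.List.insertBy]
      | cons o os =>
          have ho : key o = 1 := hO o (by simp)
          simp [PySem.List.insertBy, hx, ho]
  | cons a as ih =>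
      have ha : key a = 0 := hA a (by simp)
      have hlt : ¬ key x < key a := by omega
      simp only [List.cons_append, PySem.List.insertBy, decide_eq_true_eq, if_neg hlt]
      exact congrArg (a :: ·) (ih (fun b hb => hA b (by simp [hb])))

-- the stable insertion-sort fold with a {0,1}-valued key is the partition into the two filters
lemma foldl_insertBy_binary {α : Type} (key : α → Int) (hk : ∀ x, key x = 0 ∨ key x = 1)
    (xs : List α) (A O : List α) (hA : ∀ a ∈ A, key a = 0) (hO : ∀ o ∈ O, key o = 1) :
    xs.foldl (fun acc x => PySem.List.insertBy (fun a b => decide (key a < key b)) x acc) (A ++ O)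
      = (A ++ xs.filter (fun x => key x == 0)) ++ (O ++ xs.filter (fun x => key x != 0)) := by
  induction xs generalizing A O with
  | nil => simp
  | cons x xs ih =>
      rcases hk x with hx | hx
      · have h1 : PySem.List.insertBy (fun a b => decide (key a < key b)) x (A ++ O)
            = (A ++ [x]) ++ O := by
          rw [insertBy_binary_mid key x A O hx hA hO]; simp
        have h2 := ih (A ++ [x]) O
          (by intro a ha; rcases List.mem_append.mp ha with h | h
              · exact hA a h
              · simp at h; simpa [h] using hx) hO
        simp only [List.foldl_cons, h1, h2]
        simp [hx, List.append_assoc]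
      · have h1 : PySem.List.insertBy (fun a b => decide (key a < key b)) x (A ++ O)
            = A ++ (O ++ [x]) := by
          rw [← List.append_assoc]
          refine PySem.List.insertBy_of_forall_not_before _ _ _ ?_
          intro y hy
          have : key y = 0 ∨ key y = 1 := hk y
          simp only [decide_eq_false_iff_not]
          omega
        have h2 := ih A (O ++ [x]) hA
          (by intro o ho; rcases List.mem_append.mp ho with h | h
              · exact hO o h
              · simp at h; simpa [h] using hx)
        simp only [List.foldl_cons, h1, h2]
        simp [hx, List.append_assoc]

-- A's partition fold, characterised by the same two filters
lemma foldl_partition {α : Type} (q : α → Bool) (xs : List α) (A O : List α) :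
    xs.foldl (fun (acc : List α × List α) x =>
        if q x then (acc.1 ++ [x], acc.2) else (acc.1, acc.2 ++ [x])) (A, O)
      = (A ++ xs.filter q, O ++ xs.filter (fun x => !q x)) := by
  induction xs generalizing A O with
  | nil => simp
  | cons x xs ih =>
      by_cases hx : q x = true
      · simp [hx, ih, List.append_assoc]
      · simp only [Bool.not_eq_true] at hx
        simp [hx, ih, List.append_assoc]

-- ===== VERDICT (by name: the statement is the Claim_ definition above) =====
theorem sort_cameras_prefer_arducam_spec : Claim_equal_sort_cameras_prefer_arducam := by
  intro devices _
  show sort_cameras_prefer_arducam devices = sort_cameras_prefer_arducam_alt devices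
  set q : List (String × String) → Bool :=
    fun (d : List (String × String)) => is_arducam_device (PySem.Dict.getD (PySem.Dict.mk d) "friendly_name" "") with hq
  set key : List (String × String) → Int := fun d => if q d then 0 else 1 with hkey
  have hk : ∀ d, key d = 0 ∨ key d = 1 := by
    intro d; by_cases h : q d = true <;> simp [hkey, h]
  have hB : sort_cameras_prefer_arducam_alt devices
      = devices.filter (fun d => key d == 0) ++ devices.filter (fun d => key d != 0) := by
    show PySem.List.sorted devices key = _
    unfold PySem.List.sorted
    simpa using foldl_insertBy_binary key hk devices [] []
      (by intro a h; simp at h) (by intro o h; simp at h)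
  have hA : sort_cameras_prefer_arducam devices
      = devices.filter q ++ devices.filter (fun d => !q d) := by
    unfold sort_cameras_prefer_arducam
    simp only []
    rw [show (fun (acc : List (List (String × String)) × List (List (String × String))) (device : List (String × String)) =>
          let name := PySem.Dict.getD (PySem.Dict.mk device) "friendly_name" ""
          if is_arducam_device name then (acc.1 ++ [device], acc.2) else (acc.1, acc.2 ++ [device]))
        = (fun (acc : List (List (String × String)) × List (List (String × String))) x =>
          if q x then (acc.1 ++ [x], acc.2) else (acc.1, acc.2 ++ [x])) from rfl]
    rw [foldl_partition q devices [] []]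
    simp
  rw [hA, hB]
  have hf0 : (fun d => key d == 0) = q := by
    funext d; by_cases h : q d = true <;> simp [hkey, h]
  have hf1 : (fun d => key d != 0) = (fun d => !q d) := by
    funext d; by_cases h : q d = true <;> simp [hkey, h]
  rw [hf0, hf1]
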